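-- pv_equiv track=rewrite | github.com/nuprl/TypeWeaver | src/dataset_tools/extract_ts_from_the_stack.py | delete_between_indices
-- ===== SOURCE A (Python) =====
-- def delete_between_indices(content, pairs):
--     """
--     Given a content string and a list of pairs of indices representing nodes
--     (specifically, their start and end bytes in the byte array), return a new
--     string with those nodes deleted.
--     """
--     # Need to operate on byte string, not characters
--     content_bytes = content.encode("utf-8")
--
--     # Flatten the pairs of indices into a list. But we also want to prepend 0
--     # and append the last index of content, so we can re-pair the indices later
--     # e.g. [(s1, e1), (s2, e2)]
--     #   -> [0, s1, e1, s2, e2, n]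
--     indices = [0] + [i
--                      for p in pairs
--                      for i in p]
--     indices.append(len(content_bytes))
--
--     # We zip the list with itself (offset by 1), moving by 2 elements each time,
--     # e.g. [0, s1, e1, s2, e2, n]
--     #   -> [(0, s1), (e1, s2), (e2, n)]
--     chunks = []
--     for s, e in zip(indices[::2], indices[1::2]):
--         chunks.append(content_bytes[s:e].decode("utf-8"))
--     new_content = "".join(chunks)
--
--     return new_content
-- ===== SOURCE B (Python) =====
-- def delete_between_indices(content, pairs):
--     """
--     Given a content string and a list of pairs of indices representing nodes
--     (specifically, their start and end bytes in the byte array), return a new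
--     string with those nodes deleted.
--     """
--     content_bytes = content.encode("utf-8")
--     chunks = []
--     cursor = 0
--     for s, e in pairs:
--         chunks.append(content_bytes[cursor:s].decode("utf-8"))
--         cursor = e
--     chunks.append(content_bytes[cursor:].decode("utf-8"))
--     return "".join(chunks)
-- ===== Notes on version B (the rewrite author's own statement) =====
-- stated objective: simpler
-- what changed: Replaced the flatten-prepend-append index list and the offset self-zip re-pairing with a single running-cursor loop over the pairs that emits each kept chunk directly.
import Mathlib
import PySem

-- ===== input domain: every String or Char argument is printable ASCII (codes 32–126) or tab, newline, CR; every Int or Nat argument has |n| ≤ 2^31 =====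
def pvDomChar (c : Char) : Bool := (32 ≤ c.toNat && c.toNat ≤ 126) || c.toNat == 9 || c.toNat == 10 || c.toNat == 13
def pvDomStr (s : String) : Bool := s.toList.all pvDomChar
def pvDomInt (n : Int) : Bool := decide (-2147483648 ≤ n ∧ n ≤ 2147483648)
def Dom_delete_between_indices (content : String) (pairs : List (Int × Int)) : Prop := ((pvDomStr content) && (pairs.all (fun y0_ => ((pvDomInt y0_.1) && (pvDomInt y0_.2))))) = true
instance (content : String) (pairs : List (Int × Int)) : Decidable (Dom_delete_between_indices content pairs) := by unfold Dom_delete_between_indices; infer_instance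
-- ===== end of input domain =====

-- B replaces A's flatten-prepend-append index list and offset self-zip re-pairing
-- with a single running-cursor loop over the pairs (simpler decomposition, same cost).


-- ===== PORT A =====
-- On the ASCII domain UTF-8 encode/decode are identity on code points, so the byte
-- string is modelled by the code-point list (List Char); slicing/joining use PySem.
def delete_between_indices (content : String) (pairs : List (Int × Int)) : String :=
  let content_bytes : List Char := content.toList
  let indices : List Int :=
    (0 :: pairs.flatMap (fun p => [p.1, p.2])) ++ [(content_bytes.length : Int)]
  let chunks : List (List Char) :=
    (((PySem.List.slice? indices none none 2).getD []).zip
      ((PySem.List.slice? indices (some 1) none 2).getD [])).foldl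
      (fun acc se => acc ++ [PySem.List.slice content_bytes (some se.1) (some se.2)]) []
  String.ofList (PySem.Chars.join [] chunks)

-- ===== PORT B =====
def delete_between_indices_alt (content : String) (pairs : List (Int × Int)) : String :=
  let content_bytes : List Char := content.toList
  let st := pairs.foldl
    (fun (st : List (List Char) × Int) p =>
      (st.1 ++ [PySem.List.slice content_bytes (some st.2) (some p.1)], p.2))
    ([], 0)
  String.ofList (PySem.Chars.join []
    (st.1 ++ [PySem.List.slice content_bytes (some st.2) none]))

-- ===== PRECONDITION & SPEC =====
def Spec_delete_between_indices (content : String) (pairs : List (Int × Int)) (out : String) : Prop := out = delete_between_indices_alt content pairs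
instance (content : String) (pairs : List (Int × Int)) (out : String) : Decidable (Spec_delete_between_indices content pairs out) := by unfold Spec_delete_between_indices; infer_instance

-- ===== CLAIM (what is proved, stated in full; the proofs are below) =====
def Claim_equal_delete_between_indices : Prop := ∀ (content : String) (pairs : List (Int × Int)), Dom_delete_between_indices content pairs → Spec_delete_between_indices content pairs (delete_between_indices content pairs)

-- ===== LEMMAS AND PROOFS =====

-- every second element of a list, starting at the first
def pvEvens {α : Type} : List α → List α
  | [] => []
  | [a] => [a]
  | a :: _ :: t => a :: pvEvens t

theorem pvFilterMap_range_two {α : Type} (xs : List α) :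
    (List.range ((xs.length + 1) / 2)).filterMap (fun k => xs[2 * k]?) = pvEvens xs := by
  induction xs using pvEvens.induct with
  | case1 => simp [pvEvens]
  | case2 a => simp [pvEvens, List.range_succ]
  | case3 a b t ih =>
    have hlen : ((a :: b :: t).length + 1) / 2 = (t.length + 1) / 2 + 1 := by
      simp; omega
    rw [hlen, List.range_succ_eq_map, List.filterMap_cons, List.filterMap_map]
    simp only [pvEvens]
    have h2 : (fun k => (a :: b :: t)[2 * k]?) ∘ Nat.succ = fun k => t[2 * k]? := by
      funext k
      have h3 : 2 * Nat.succ k = (2 * k) + 2 := by omega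
      simp [h3]
    simp only [h2]
    simp [ih]

-- indices[::2] is every second element (slice? with step 2, unfolded once and for all)
theorem pvSlice2_evens {α : Type} (xs : List α) :
    (PySem.List.slice? xs none none 2).getD [] = pvEvens xs := by
  simp only [PySem.List.slice?, PySem.List.sliceIndices]
  norm_num
  have hc : (if 0 < xs.length then (((xs.length : Int) + 2 - 1) / 2).toNat else 0)
      = (xs.length + 1) / 2 := by
    have h1 : ((xs.length : Int) + 2 - 1) = ((xs.length + 1 : Nat) : Int) := by push_cast; ring
    rw [h1, show (2:Int) = ((2:Nat):Int) from rfl, ← Int.natCast_div, Int.toNat_natCast]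
    split_ifs with h0
    · rfl
    · omega
  rw [hc, ← pvFilterMap_range_two xs]
  apply List.filterMap_congr
  intro k _
  congr 1

-- indices[1::2] is every second element of the tail
theorem pvSlice2_odds {α : Type} (xs : List α) :
    (PySem.List.slice? xs (some 1) none 2).getD [] = pvEvens xs.tail := by
  simp only [PySem.List.slice?, PySem.List.sliceIndices]
  norm_num
  cases xs with
  | nil => simp [pvEvens]
  | cons a t =>
    have hc : (if 1 < (a :: t).length then ((((a :: t).length : Int) - 1 + 2 - 1) / 2).toNat else 0)
        = (t.length + 1) / 2 := by
      simp only [List.length_cons]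
      have h1 : ((t.length + 1 : Nat) : Int) - 1 + 2 - 1 = ((t.length + 1 : Nat) : Int) := by
        push_cast; ring
      rw [h1, show (2:Int) = ((2:Nat):Int) from rfl, ← Int.natCast_div, Int.toNat_natCast]
      split_ifs with h0
      · rfl
      · have ht : t.length = 0 := by omega
        simp [ht]
    have hm : min (1:Int) (((a :: t).length : Int)) = 1 := by
      simp only [List.length_cons]; push_cast; omega
    rw [hm, hc, List.tail_cons, ← pvFilterMap_range_two t]
    apply List.filterMap_congr
    intro k _
    have h2 : ((1:Int) + 2 * (k:Int)).toNat = 2 * k + 1 := by omega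
    rw [h2, List.getElem?_cons_succ]

-- B's cursor loop, characterized: the chunks it emits and the final cursor
def pvGo (cb : List Char) : Int → List (Int × Int) → List (List Char)
  | _, [] => []
  | c, (s, e) :: r => PySem.List.slice cb (some c) (some s) :: pvGo cb e r

def pvLast : Int → List (Int × Int) → Int
  | c, [] => c
  | _, (_, e) :: r => pvLast e r

theorem pvFoldB (cb : List Char) (pairs : List (Int × Int)) :
    ∀ (acc : List (List Char)) (c : Int),
    pairs.foldl
      (fun (st : List (List Char) × Int) p =>
        (st.1 ++ [PySem.List.slice cb (some st.2) (some p.1)], p.2)) (acc, c)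
      = (acc ++ pvGo cb c pairs, pvLast c pairs) := by
  induction pairs with
  | nil => intro acc c; simp [pvGo, pvLast]
  | cons p r ih =>
    intro acc c
    obtain ⟨s, e⟩ := p
    simp only [List.foldl_cons, pvGo, pvLast, ih]
    simp

-- A's chunk loop is a map over the zipped slice pairs
theorem pvFoldA {α : Type} (f : Int × Int → α) (l : List (Int × Int)) :
    ∀ (acc : List α), l.foldl (fun acc se => acc ++ [f se]) acc = acc ++ l.map f := by
  induction l with
  | nil => simp
  | cons x r ih => intro acc; simp [ih]

-- a slice ending at the full length equals an open-ended slice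
theorem pvSliceEnd (cb : List Char) (c : Int) :
    PySem.List.slice cb (some c) (some (cb.length : Int)) = PySem.List.slice cb (some c) none := by
  simp only [PySem.List.slice]
  congr 1
  simp

-- main induction: A's re-paired chunks equal B's cursor chunks plus the final chunk
theorem pvMain (cb : List Char) (pairs : List (Int × Int)) :
    ∀ (c : Int),
    ((pvEvens (c :: (pairs.flatMap (fun p => [p.1, p.2]) ++ [(cb.length : Int)]))).zip
      (pvEvens (pairs.flatMap (fun p => [p.1, p.2]) ++ [(cb.length : Int)]))).map
        (fun se => PySem.List.slice cb (some se.1) (some se.2))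
      = pvGo cb c pairs ++ [PySem.List.slice cb (some (pvLast c pairs)) none] := by
  induction pairs with
  | nil =>
    intro c
    simp [pvEvens, pvGo, pvLast, pvSliceEnd]
  | cons p r ih =>
    intro c
    obtain ⟨s, e⟩ := p
    simp only [List.flatMap_cons, List.cons_append, List.nil_append, pvEvens, pvGo, pvLast]
    simp only [List.zip_cons_cons, List.map_cons]
    rw [ih e]

-- ===== VERDICT (by name: the statement is the Claim_ definition above) =====
theorem delete_between_indices_spec : Claim_equal_delete_between_indices := by
  intro content pairs _
  unfold Spec_delete_between_indices delete_between_indices delete_between_indices_alt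
  simp only [pvSlice2_evens, pvSlice2_odds, pvFoldA, pvFoldB, List.nil_append,
    List.cons_append, List.tail_cons]
  rw [pvMain]
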